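-- pv_equiv track=rewrite | github.com/joacodp/voley | claseEquipoDeVolley.py | esSublista
-- ===== SOURCE A (Python) =====
-- def esSublista(lista,sublista):
-- 	#Tamaño de sublista = 2
-- 	indice = -1
-- 	esta = False
-- 	for i in range(len(lista)-1):
-- 		if lista[i] == sublista[0]:
-- 			if lista[i+1] == sublista[1]:
-- 				esta = True
-- 				indice = i
-- 	return(esta, indice)
-- ===== SOURCE B (Python) =====
-- def esSublista(lista, sublista):
--     pairs = list(zip(lista, lista[1:]))
--     target = tuple(sublista[:2])
--     if target in pairs:
--         return (True, len(pairs) - 1 - pairs[::-1].index(target))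
--     return (False, -1)
-- ===== Notes on version B (the rewrite author's own statement) =====
-- stated objective: alternative
-- what changed: B materialises the adjacent-pair list zip(lista, lista[1:]) once and finds the last occurrence of tuple(sublista[:2]) with a membership test plus a reversed .index lookup, instead of A's index loop over range(len-1) that overwrites (esta, indice) on every match.
-- outside the precondition, e.g. on esSublista([5, 6, 7], []): A raises IndexError, B returns (False, -1); on esSublista([5, 6, 7], [5]): A raises IndexError, B returns (False, -1)
import Mathlib
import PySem

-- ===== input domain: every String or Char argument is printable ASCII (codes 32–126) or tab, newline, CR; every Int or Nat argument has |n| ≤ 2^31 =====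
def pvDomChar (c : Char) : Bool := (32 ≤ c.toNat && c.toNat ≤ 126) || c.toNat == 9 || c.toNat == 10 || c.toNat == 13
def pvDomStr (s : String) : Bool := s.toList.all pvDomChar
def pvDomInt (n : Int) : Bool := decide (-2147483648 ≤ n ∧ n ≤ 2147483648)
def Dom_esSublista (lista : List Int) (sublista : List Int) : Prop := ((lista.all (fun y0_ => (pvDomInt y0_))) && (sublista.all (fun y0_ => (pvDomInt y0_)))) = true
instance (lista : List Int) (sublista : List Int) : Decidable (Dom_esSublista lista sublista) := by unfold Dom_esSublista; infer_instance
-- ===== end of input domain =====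

-- B builds the list of adjacent pairs zip(lista, lista[1:]) once and locates the last occurrence
-- of the target pair by a reversed .index lookup, instead of A's index loop that overwrites its state.


-- ===== PORT A =====
-- forward pass over range(len(lista)-1), overwriting (esta, indice) at every match; the
-- .getD 0 defaults are unreachable inside Pre_esSublista (where the Python never raises IndexError)
def esSublista (lista : List Int) (sublista : List Int) : Bool × Int :=
  (PySem.List.pyRange 0 ((lista.length : Int) - 1) 1).foldl
    (fun st i =>
      if (PySem.List.pyGet? lista i).getD 0 = (PySem.List.pyGet? sublista 0).getD 0 then
        if (PySem.List.pyGet? lista (i + 1)).getD 0 = (PySem.List.pyGet? sublista 1).getD 0 then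
          (true, i)
        else st
      else st)
    (false, -1)

-- ===== PORT B =====
-- pairs = list(zip(lista, lista[1:])); target = tuple(sublista[:2]);
-- Python tuples of length ≤ 2 are encoded as the corresponding List Int (equality is componentwise
-- and length-sensitive in both worlds, so this encoding is exact).
def esSublista_alt (lista : List Int) (sublista : List Int) : Bool × Int :=
  let pairs := (lista.zip (PySem.List.slice lista (some 1) none)).map (fun p => [p.1, p.2])
  let target := PySem.List.slice sublista none (some 2)
  if pairs.contains target then
    match PySem.List.index? pairs.reverse target with
    | some j => (true, (pairs.length : Int) - 1 - j)
    | none => (false, -1)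
  else (false, -1)

-- ===== PRECONDITION & SPEC =====
-- Pre_ excludes exactly the inputs where Python A raises IndexError on sublista:
-- len(lista) ≥ 2 with sublista empty, or sublista of length 1 whose single element matches some lista[i], i < len-1.
def Pre_esSublista (lista : List Int) (sublista : List Int) : Prop :=
  lista.length ≤ 1 ∨ 2 ≤ sublista.length ∨
    (sublista.length = 1 ∧ sublista.headD 0 ∉ lista.dropLast)
instance (lista : List Int) (sublista : List Int) : Decidable (Pre_esSublista lista sublista) := by
  unfold Pre_esSublista; infer_instance

def pvWitness_esSublista : List Int × List Int := ([1, 2, 1, 2, 3], [1, 2])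

def Spec_esSublista (lista : List Int) (sublista : List Int) (out : Bool × Int) : Prop := out = esSublista_alt lista sublista
instance (lista : List Int) (sublista : List Int) (out : Bool × Int) : Decidable (Spec_esSublista lista sublista out) := by unfold Spec_esSublista; infer_instance

-- ===== CLAIM (what is proved, stated in full; the proofs are below) =====
def Claim_equal_esSublista : Prop := ∀ (lista : List Int) (sublista : List Int), Dom_esSublista lista sublista → Pre_esSublista lista sublista → Spec_esSublista lista sublista (esSublista lista sublista)

-- ===== LEMMAS AND PROOFS =====

-- the per-index hit test of A's loop body
def pvHit (lista sublista : List Int) (i : Int) : Bool :=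
  decide ((PySem.List.pyGet? lista i).getD 0 = (PySem.List.pyGet? sublista 0).getD 0) &&
  decide ((PySem.List.pyGet? lista (i + 1)).getD 0 = (PySem.List.pyGet? sublista 1).getD 0)

-- A's overwriting fold returns the LAST hit: find? over the reversed index list
theorem foldl_find (lista sublista : List Int) (l : List Int) (st : Bool × Int) :
    l.foldl
      (fun st i =>
        if (PySem.List.pyGet? lista i).getD 0 = (PySem.List.pyGet? sublista 0).getD 0 then
          if (PySem.List.pyGet? lista (i + 1)).getD 0 = (PySem.List.pyGet? sublista 1).getD 0 then
            (true, i)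
          else st
        else st) st =
      match l.reverse.find? (pvHit lista sublista) with
      | some i => (true, i)
      | none => st := by
  induction l generalizing st with
  | nil => rfl
  | cons a t ih =>
    simp only [List.foldl_cons, List.reverse_cons, List.find?_append]
    rw [ih]
    cases hf : t.reverse.find? (pvHit lista sublista) with
    | some i => simp
    | none =>
      simp only [Option.none_or, List.find?_cons, List.find?_nil]
      unfold pvHit
      by_cases h1 : (PySem.List.pyGet? lista a).getD 0 = (PySem.List.pyGet? sublista 0).getD 0 <;>
        by_cases h2 : (PySem.List.pyGet? lista (a + 1)).getD 0 = (PySem.List.pyGet? sublista 1).getD 0 <;>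
        simp [h1, h2]

-- find? only looks at the elements: congruence under a pointwise-equal predicate
theorem pvFind?_congr {α : Type} (p q : α → Bool) (l : List α)
    (h : ∀ x ∈ l, p x = q x) : l.find? p = l.find? q := by
  induction l with
  | nil => rfl
  | cons a t ih =>
    simp only [List.find?_cons, h a (List.mem_cons_self)]
    cases q a <;> simp [ih (fun x hx => h x (List.mem_cons_of_mem _ hx))]

-- B's contains/reversed-index computation equals a reversed find? over positions
theorem index_find {α : Type} [BEq α] [LawfulBEq α] [DecidableEq α] (keys : List α) (t : α) :
    (if keys.contains t then
      match PySem.List.index? keys.reverse t with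
      | some j => (true, (keys.length : Int) - 1 - (j : Int))
      | none => ((false : Bool), (-1 : Int))
    else (false, -1)) =
      match (List.range keys.length).reverse.find? (fun n => decide (keys[n]? = some t)) with
      | some n => (true, (n : Int))
      | none => (false, -1) := by
  induction keys using List.reverseRecOn with
  | nil => simp
  | append_singleton ks a ih =>
    have hrev : (ks ++ [a]).reverse = a :: ks.reverse := by simp
    have hrange : (List.range (ks ++ [a]).length).reverse =
        ks.length :: (List.range ks.length).reverse := by
      simp [List.range_succ]
    have hcongr : (List.range ks.length).reverse.find?
          (fun n => decide ((ks ++ [a])[n]? = some t)) =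
        (List.range ks.length).reverse.find? (fun n => decide (ks[n]? = some t)) := by
      apply pvFind?_congr
      intro n hn
      have hlt : n < ks.length := List.mem_range.mp (List.mem_reverse.mp hn)
      rw [List.getElem?_append_left hlt]
    by_cases ha : a = t
    · subst ha
      have h1 : PySem.List.index? (ks ++ [a]).reverse a = some 0 := by
        rw [hrev]; exact PySem.List.index?_cons_self _ _
      have h2 : (ks ++ [a])[ks.length]? = some a := by
        simp
      have hc : (ks ++ [a]).contains a = true := by simp
      rw [hrange]
      simp only [List.find?_cons, h2, if_pos, hc, h1]
      simp only [List.length_append, List.length_singleton]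
      simp
    · have hta : ¬ t = a := fun h => ha h.symm
      have hc : (ks ++ [a]).contains t = ks.contains t := by
        simp
        intro h; exact absurd h.symm ha
      have hidx : PySem.List.index? (ks ++ [a]).reverse t =
          (PySem.List.index? ks.reverse t).map (· + 1) := by
        rw [hrev]
        exact PySem.List.index?_cons_of_ne _ ha
      have hhead : ((ks ++ [a])[ks.length]? = some t) = False := by
        simp [ha]
      rw [hrange]
      simp only [List.find?_cons, hhead, decide_false, hcongr, hc, hidx,
        List.length_append, List.length_singleton]
      by_cases hk : ks.contains t
      · have hmem : t ∈ ks.reverse := by simpa using hk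
        cases hj : PySem.List.index? ks.reverse t with
        | none =>
          exact absurd ((PySem.List.index?_eq_none_iff _ _).mp hj) (by simpa using hk)
        | some j =>
          have hih := ih
          simp only [hk, if_true, hj] at hih
          cases hf : (List.range ks.length).reverse.find? (fun n => decide (ks[n]? = some t)) with
          | none => rw [hf] at hih; simp at hih
          | some n =>
            rw [hf] at hih
            have hval : ((ks.length : Int) - 1 - (j : Int)) = (n : Int) := congrArg Prod.snd hih
            simp only [hk, if_true, Option.map_some]
            simp only [Prod.mk.injEq]
            refine ⟨by simp, ?_⟩
            push_cast at hval ⊢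
            omega
      · have hnone : PySem.List.index? ks.reverse t = none :=
          (PySem.List.index?_eq_none_iff _ _).mpr (by simpa using hk)
        have hfnone : (List.range ks.length).reverse.find?
            (fun n => decide (ks[n]? = some t)) = none := by
          have hih := ih
          simp only [hk, if_false, Bool.false_eq_true] at hih
          cases hf : (List.range ks.length).reverse.find? (fun n => decide (ks[n]? = some t)) with
          | none => rfl
          | some n => rw [hf] at hih; simp at hih
        have hnone' : List.idxOf? t ks.reverse = none := by
          simpa [PySem.List.index?_eq_idxOf?] using hnone
        simp [hnone', hfnone]

-- ===== VERDICT (by name: the statement is the Claim_ definition above) =====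
theorem esSublista_spec : Claim_equal_esSublista := by
  intro lista sublista _ hpre
  unfold Spec_esSublista esSublista esSublista_alt
  rw [foldl_find]
  set keys := (lista.zip (PySem.List.slice lista (some 1) none)).map (fun p => [p.1, p.2]) with hkeys
  have hslice : PySem.List.slice lista (some 1) none = lista.tail := PySem.List.slice_from_one lista
  have hklen : keys.length = lista.length - 1 := by
    simp [hkeys, hslice, List.length_zip, List.length_tail]
  dsimp only
  rw [index_find keys (PySem.List.slice sublista none (some 2))]
  -- rewrite A's pyRange as positions 0..n-1
  have hrange : PySem.List.pyRange 0 ((lista.length : Int) - 1) 1 =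
      (List.range keys.length).map (fun (k : Nat) => (0 : Int) + (k : Int)) := by
    rw [PySem.List.pyRange_one]
    have h1 : (((lista.length : Int) - 1) - 0).toNat = keys.length := by omega
    rw [h1]
  rw [hrange]
  simp only [zero_add]
  rw [← List.map_reverse, List.find?_map]
  have hhit : ∀ n ∈ (List.range keys.length).reverse, pvHit lista sublista (n : Int) =
      decide (keys[n]? = some (PySem.List.slice sublista none (some 2))) := by
    intro n hn
    have hnlt : n < keys.length := List.mem_range.mp (List.mem_reverse.mp hn)
    have hn1 : n + 1 < lista.length := by omega
    have hgetk : keys[n]? = some [lista.get (⟨n, by omega⟩), lista.get ⟨n+1, hn1⟩] := by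
      have hz : (lista.zip lista.tail)[n]? =
          some (lista.get ⟨n, by omega⟩, lista.get ⟨n+1, hn1⟩) := by
        have hn' : n < (lista.zip lista.tail).length := by
          simp [List.length_zip, List.length_tail]; omega
        rw [List.getElem?_eq_getElem hn']
        simp [List.getElem_zip, List.getElem_tail]
      simp [hkeys, hslice, hz]
    have hga : PySem.List.pyGet? lista (n : Int) = some (lista.get ⟨n, by omega⟩) := by
      rw [PySem.List.pyGet?_natCast]
      simp [List.getElem?_eq_getElem (by omega : n < lista.length)]
    have hgb : PySem.List.pyGet? lista ((n : Int) + 1) = some (lista.get ⟨n+1, hn1⟩) := by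
      have : ((n : Int) + 1) = ((n + 1 : Nat) : Int) := by push_cast; ring
      rw [this, PySem.List.pyGet?_natCast]
      simp [List.getElem?_eq_getElem hn1]
    rcases hpre with hp | hp | hp
    · omega
    · -- sublista has at least two elements
      obtain ⟨s0, s1, rest, hs⟩ : ∃ s0 s1 rest, sublista = s0 :: s1 :: rest := by
        match sublista, hp with
        | s0 :: s1 :: rest, _ => exact ⟨s0, s1, rest, rfl⟩
      subst hs
      have htgt : PySem.List.slice (s0 :: s1 :: rest) none (some 2) = [s0, s1] := by
        rw [show (2:Int) = ((2:Nat):Int) from rfl, PySem.List.slice_to_natCast]; rfl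
      unfold pvHit
      rw [hga, hgb, htgt, hgetk]
      simp
    · -- sublista = [s0] with s0 not among lista[0..len-2]
      obtain ⟨hs1, hnotin⟩ := hp
      obtain ⟨s0, hs⟩ : ∃ s0, sublista = [s0] := by
        match sublista, hs1 with
        | [s0], _ => exact ⟨s0, rfl⟩
      subst hs
      have hmem : lista.get (⟨n, by omega⟩ : Fin lista.length) ∈ lista.dropLast := by
        have hd : n < lista.dropLast.length := by simp [List.length_dropLast]; omega
        rw [List.get_eq_getElem, ← List.getElem_dropLast hd]
        exact List.getElem_mem _
      have hne : lista.get (⟨n, by omega⟩ : Fin lista.length) ≠ s0 := by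
        intro h; rw [h] at hmem; exact hnotin (by simpa using hmem)
      have htgt : PySem.List.slice ([s0] : List Int) none (some 2) = [s0] := by
        rw [show (2:Int) = ((2:Nat):Int) from rfl, PySem.List.slice_to_natCast]; rfl
      unfold pvHit
      rw [hga, htgt, hgetk]
      simp
      intro h
      exact absurd h (by simpa using hne)
  rw [show (pvHit lista sublista ∘ fun k : Nat => ((k : Int))) =
      (fun n : Nat => pvHit lista sublista (n : Int)) from rfl]
  rw [pvFind?_congr _ _ _ hhit]
  cases hf : (List.range keys.length).reverse.find?
      (fun n => decide (keys[n]? = some (PySem.List.slice sublista none (some 2)))) with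
  | none => rfl
  | some n => rfl
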